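-- pv_equiv track=rewrite | github.com/fossabot/beehive | beehive/common/apimanager.py | get_needs
-- ===== SOURCE A (Python) =====
-- def get_needs(args):
--     """"""
--     # first item *.*.*.....
--     act_need = [u'*' for i in args]
--     needs = [u'//'.join(act_need)]
--     pos = 0
--     for arg in args:
--         act_need[pos] = arg
--         needs.append(u'//'.join(act_need))
--         pos += 1
--
--     return set(needs)
-- ===== SOURCE B (Python) =====
-- def get_needs(args):
--     args = list(args)
--     n = len(args)
--     # pass 1: stars[k] = k wildcards joined, built by string accumulation
--     stars = ['']
--     s = ''
--     for _ in range(n):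
--         s = '*' if not s else s + '//*'
--         stars.append(s)
--     # pass 2: grow the joined real-args prefix one arg at a time and pad it
--     # with the precomputed star tail of the right length
--     needs = {stars[n]}
--     prefix = ''
--     for i, x in enumerate(args):
--         prefix = x if i == 0 else prefix + '//' + x
--         rest = stars[n - 1 - i]
--         needs.add(prefix + '//' + rest if rest else prefix)
--     return needs
-- ===== Notes on version B (the rewrite author's own statement) =====
-- stated objective: alternative
-- what changed: B drops A's mutated act_need component list and per-step '//'.join over it: a first pass builds the star-tail strings stars[k] by string accumulation, then a second pass grows the joined real-args prefix one argument at a time and pads it with the precomputed star tail.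
import Mathlib
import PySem

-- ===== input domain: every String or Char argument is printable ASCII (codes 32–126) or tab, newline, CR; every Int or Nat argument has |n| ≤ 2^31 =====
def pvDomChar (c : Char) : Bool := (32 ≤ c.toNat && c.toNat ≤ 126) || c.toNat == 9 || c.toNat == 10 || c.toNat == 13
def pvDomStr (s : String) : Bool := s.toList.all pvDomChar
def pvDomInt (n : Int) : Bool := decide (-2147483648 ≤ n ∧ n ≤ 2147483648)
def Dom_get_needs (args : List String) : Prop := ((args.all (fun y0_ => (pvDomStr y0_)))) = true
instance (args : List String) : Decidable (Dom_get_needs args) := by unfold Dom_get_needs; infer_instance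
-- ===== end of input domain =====

-- B replaces A's per-step join over a mutated act_need list with two staged passes of
-- incremental string accumulation (a star-tail table, then a growing joined prefix);
-- objective: alternative decomposition. Return value is a Python set.

-- ===== PORT A =====
-- state: (act_need, needs, pos), exactly A's mutable variables
def get_needs (args : List String) : List String :=
  let act_need := args.map (fun _ => "*")
  let st := args.foldl
    (fun (st : List String × List String × Int) arg =>
      let act := PySem.List.pySetD st.1 st.2.2 arg
      (act, st.2.1 ++ [PySem.Str.join "//" act], st.2.2 + 1))
    (act_need, [PySem.Str.join "//" act_need], 0)
  PySem.Set.ofList st.2.1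

-- ===== PORT B =====
-- Source B: pass 1 builds stars[k] by string accumulation (state (stars, s));
-- pass 2 grows the joined prefix over enumerate(args) (state (needs, prefix))
def get_needs_alt (args : List String) : List String :=
  let n := args.length
  let stars := ((PySem.List.pyRange 0 (n : Int)).foldl
      (fun (p : List String × String) _ =>
        let s := if p.2 == "" then "*" else p.2 ++ "//*"
        (p.1 ++ [s], s)) ([""], "")).1
  let st := (PySem.List.enumerate args).foldl
      (fun (p : List String × String) ix =>
        let pre := if ix.1 == 0 then ix.2 else p.2 ++ "//" ++ ix.2
        let rest := PySem.List.pyGetD stars ((n : Int) - 1 - ix.1) ""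
        (PySem.Set.add p.1 (if rest == "" then pre else pre ++ "//" ++ rest), pre))
      (PySem.Set.ofList [PySem.List.pyGetD stars (n : Int) ""], "")
  st.1

-- ===== PRECONDITION & SPEC =====
def Spec_get_needs (args : List String) (out : List String) : Prop := out = get_needs_alt args
instance (args : List String) (out : List String) : Decidable (Spec_get_needs args out) := by unfold Spec_get_needs; infer_instance

-- ===== CLAIM (what is proved, stated in full; the proofs are below) =====
def Claim_equal_get_needs : Prop := ∀ (args : List String), Dom_get_needs args → Spec_get_needs args (get_needs args)

-- ===== LEMMAS AND PROOFS =====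

-- the i-th need string, computed from the original args
def pvNeed (args : List String) (i : Nat) : String :=
  PySem.Str.join "//" (args.take i ++ List.replicate (args.length - i) "*")

-- k wildcards joined
def pvStars (k : Nat) : String :=
  PySem.Str.join "//" (List.replicate k "*")

-- the first i+1 need strings in A's insertion order
def pvP (args : List String) (i : Nat) : List String :=
  pvNeed args 0 :: (List.range i).map (fun j => pvNeed args (j + 1))

lemma pvJoin_nil : PySem.Str.join "//" ([] : List String) = "" := by
  simp [PySem.Str.join, PySem.Chars.join, List.intercalate]

lemma pvJoin_singleton (x : String) : PySem.Str.join "//" [x] = x := by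
  simp [PySem.Str.join, PySem.Chars.join_singleton]

lemma pvJoin_cons_cons (sep a b : String) (rest : List String) :
    PySem.Str.join sep (a :: b :: rest) = a ++ sep ++ PySem.Str.join sep (b :: rest) := by
  simp [PySem.Str.join, PySem.Chars.join_cons_cons, ← String.append_assoc]

lemma pvJoin_cons_ne (x : String) (t : List String) (h : t ≠ []) :
    PySem.Str.join "//" (x :: t) = x ++ "//" ++ PySem.Str.join "//" t := by
  cases t with
  | nil => exact absurd rfl h
  | cons p ps => exact pvJoin_cons_cons "//" x p ps

lemma pvJoin_append (a b : List String) (ha : a ≠ []) (hb : b ≠ []) :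
    PySem.Str.join "//" (a ++ b)
      = PySem.Str.join "//" a ++ "//" ++ PySem.Str.join "//" b := by
  induction a with
  | nil => exact absurd rfl ha
  | cons x xs ih =>
    cases xs with
    | nil => rw [List.singleton_append, pvJoin_cons_ne x b hb, pvJoin_singleton]
    | cons y ys =>
      rw [List.cons_append, pvJoin_cons_ne x _ (by simp), ih (by simp),
          pvJoin_cons_ne x (y :: ys) (by simp)]
      simp [String.append_assoc]

lemma pvStars_succ_ne (k : Nat) : pvStars (k + 1) ≠ "" := by
  cases k with
  | zero => rw [show pvStars 1 = "*" from pvJoin_singleton "*"]; decide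
  | succ m =>
    have h : pvStars (m + 2) = "*" ++ "//" ++ pvStars (m + 1) := by
      unfold pvStars
      rw [show List.replicate (m + 2) "*" = "*" :: List.replicate (m + 1) "*" from rfl]
      exact pvJoin_cons_cons "//" "*" "*" (List.replicate m "*")
    rw [h]
    intro hc
    have := congrArg String.toList hc
    simp [String.toList_append] at this

lemma pvStars_step (j : Nat) :
    (if pvStars j == "" then "*" else pvStars j ++ "//*") = pvStars (j + 1) := by
  cases j with
  | zero =>
    rw [if_pos (by rw [show pvStars 0 = "" from pvJoin_nil]; rfl)]
    exact (pvJoin_singleton "*").symm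
  | succ k =>
    rw [if_neg (by simp [pvStars_succ_ne k])]
    unfold pvStars
    rw [show List.replicate (k + 2) "*" = List.replicate (k + 1) "*" ++ ["*"] by
          rw [← List.replicate_succ']
        , pvJoin_append _ _ (by simp) (by simp), pvJoin_singleton]
    rw [String.append_assoc]
    rfl

-- ---------- A-side ----------

lemma pvSet_mid (pre t : List String) (a : String) :
    (pre ++ "*" :: t).set pre.length a = pre ++ a :: t := by
  induction pre with
  | nil => rfl
  | cons x xs ih => simp [ih]

lemma pvFold_needs : ∀ (suf pre N : List String),
    ((suf.foldl
      (fun (st : List String × List String × Int) arg =>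
        let act := PySem.List.pySetD st.1 st.2.2 arg
        (act, st.2.1 ++ [PySem.Str.join "//" act], st.2.2 + 1))
      (pre ++ List.replicate suf.length "*", N, (pre.length : Int))).2.1)
    = N ++ (List.range suf.length).map (fun j => pvNeed (pre ++ suf) (pre.length + 1 + j)) := by
  intro suf
  induction suf with
  | nil => intro pre N; simp
  | cons a rest ih =>
    intro pre N
    have hset : PySem.List.pySetD (pre ++ List.replicate (a :: rest).length "*")
        ((pre.length : Nat) : Int) a = (pre ++ [a]) ++ List.replicate rest.length "*" := by
      rw [PySem.List.pySetD_natCast]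
      simp only [List.length_cons, List.replicate_succ]
      have := pvSet_mid pre (List.replicate rest.length "*") a
      simp only [List.append_assoc, List.singleton_append]
      exact this
    have hpos : ((pre.length : Nat) : Int) + 1 = (((pre ++ [a]).length : Nat) : Int) := by
      simp
    simp only [List.foldl_cons, hset, hpos]
    rw [ih (pre ++ [a]) (N ++ [PySem.Str.join "//" ((pre ++ [a]) ++ List.replicate rest.length "*")])]
    have hfull : pre ++ [a] ++ rest = pre ++ a :: rest := by simp
    have hhead : PySem.Str.join "//" ((pre ++ [a]) ++ List.replicate rest.length "*")
        = pvNeed (pre ++ a :: rest) (pre.length + 1) := by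
      unfold pvNeed
      have ht : (pre ++ a :: rest).take (pre.length + 1) = pre ++ [a] := by
        rw [List.take_append]
        simp
      have hl : (pre ++ a :: rest).length - (pre.length + 1) = rest.length := by
        simp only [List.length_append, List.length_cons]
        omega
      rw [ht, hl]
    rw [hfull, hhead]
    have hmap : (List.range rest.length).map
          (fun j => pvNeed (pre ++ a :: rest) ((pre ++ [a]).length + 1 + j))
        = (List.range rest.length).map
          (fun j => pvNeed (pre ++ a :: rest) (pre.length + 1 + (j + 1))) := by
      apply List.map_congr_left
      intro j _
      congr 1
      simp
      omega
    rw [hmap, List.length_cons, List.range_succ_eq_map, List.map_cons, List.map_map]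
    simp [Function.comp]

lemma pvA_eq (args : List String) :
    get_needs args = PySem.Set.ofList ((List.range (args.length + 1)).map (pvNeed args)) := by
  have h0 : args.map (fun _ => "*") = List.replicate args.length "*" := by
    simp [List.map_const']
  simp only [get_needs, h0]
  have hf := pvFold_needs args [] [PySem.Str.join "//" (List.replicate args.length "*")]
  simp only [List.nil_append, List.length_nil, Nat.cast_zero] at hf
  rw [hf, List.range_succ_eq_map]
  congr 1
  rw [List.map_cons, List.map_map]
  have hhd : pvNeed args 0 = PySem.Str.join "//" (List.replicate args.length "*") := by
    unfold pvNeed; simp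
  rw [hhd, List.singleton_append]
  congr 1
  apply List.map_congr_left
  intro j _
  congr 1
  simp [Nat.add_comm]

-- ---------- B-side: pass 1 (the stars table) ----------

lemma pvStarsFold : ∀ (l : List Int) (j : Nat),
    (l.foldl
      (fun (p : List String × String) _ =>
        let s := if p.2 == "" then "*" else p.2 ++ "//*"
        (p.1 ++ [s], s))
      ((List.range (j + 1)).map pvStars, pvStars j))
    = ((List.range (j + l.length + 1)).map pvStars, pvStars (j + l.length)) := by
  intro l
  induction l with
  | nil => intro j; simp
  | cons a rest ih =>
    intro j
    simp only [List.foldl_cons, pvStars_step]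
    have hl : (List.range (j + 1)).map pvStars ++ [pvStars (j + 1)]
        = (List.range (j + 1 + 1)).map pvStars := by
      simp [List.range_succ]
    rw [hl, ih (j + 1)]
    have h1 : j + 1 + rest.length = j + (rest.length + 1) := by omega
    simp only [List.length_cons, h1]

lemma pvStars_eq (n : Nat) :
    ((PySem.List.pyRange 0 (n : Int)).foldl
      (fun (p : List String × String) _ =>
        let s := if p.2 == "" then "*" else p.2 ++ "//*"
        (p.1 ++ [s], s)) ([""], "")).1
    = (List.range (n + 1)).map pvStars := by
  have h0 : ([""] , ("" : String)) = ((List.range (0 + 1)).map pvStars, pvStars 0) := by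
    simp [pvStars, pvJoin_nil]
  rw [h0, pvStarsFold]
  have : (PySem.List.pyRange 0 (n : Int)).length = n := by
    rw [PySem.List.pyRange_one]
    simp
  rw [this]
  simp

lemma pvGetStars (n k : Nat) (hk : k ≤ n) :
    PySem.List.pyGetD ((List.range (n + 1)).map pvStars) ((k : Nat) : Int) "" = pvStars k := by
  rw [PySem.List.pyGetD_natCast]
  rw [List.getD_eq_getElem?_getD]
  simp [Nat.lt_succ_of_le hk]

-- ---------- B-side: pass 2 (the prefix-growing loop) ----------

lemma pvFold2 (args : List String) : ∀ (suf pre : List String), pre ++ suf = args →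
    ((PySem.List.enumerate suf ((pre.length : Nat) : Int)).foldl
      (fun (p : List String × String) ix =>
        let pre := if ix.1 == 0 then ix.2 else p.2 ++ "//" ++ ix.2
        let rest := PySem.List.pyGetD ((List.range (args.length + 1)).map pvStars)
          ((args.length : Int) - 1 - ix.1) ""
        (PySem.Set.add p.1 (if rest == "" then pre else pre ++ "//" ++ rest), pre))
      (PySem.Set.ofList (pvP args pre.length), PySem.Str.join "//" pre))
    = (PySem.Set.ofList (pvP args args.length), PySem.Str.join "//" args) := by
  intro suf
  induction suf with
  | nil =>
    intro pre h
    simp only [List.append_nil] at h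
    subst h
    rw [PySem.List.enumerate_nil]
    rfl
  | cons x rest ih =>
    intro pre h
    have hlen : args.length = pre.length + rest.length + 1 := by
      rw [← h]; simp; omega
    rw [PySem.List.enumerate_cons, List.foldl_cons]
    -- the new prefix string
    have hpre : (if ((pre.length : Nat) : Int) == 0 then x
        else PySem.Str.join "//" pre ++ "//" ++ x) = PySem.Str.join "//" (pre ++ [x]) := by
      cases pre with
      | nil => simp [pvJoin_singleton]
      | cons q qs =>
        rw [if_neg (by simp; omega)]
        rw [pvJoin_append (q :: qs) [x] (by simp) (by simp), pvJoin_singleton]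
    -- the star tail picked from the table
    have hidx : (args.length : Int) - 1 - ((pre.length : Nat) : Int)
        = ((rest.length : Nat) : Int) := by
      rw [hlen]; push_cast; ring
    have hrest : PySem.List.pyGetD ((List.range (args.length + 1)).map pvStars)
        ((args.length : Int) - 1 - ((pre.length : Nat) : Int)) "" = pvStars rest.length := by
      rw [hidx]; exact pvGetStars args.length rest.length (by omega)
    -- the appended need string is pvNeed args (pre.length + 1)
    have htake : args.take (pre.length + 1) = pre ++ [x] := by
      rw [← h, List.take_append]
      simp
    have hneed : (if pvStars rest.length == "" then PySem.Str.join "//" (pre ++ [x])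
          else PySem.Str.join "//" (pre ++ [x]) ++ "//" ++ pvStars rest.length)
        = pvNeed args (pre.length + 1) := by
      unfold pvNeed
      rw [htake, show args.length - (pre.length + 1) = rest.length by omega]
      cases hr : rest.length with
      | zero =>
        rw [if_pos (by rw [show pvStars 0 = "" from pvJoin_nil]; rfl)]
        simp
      | succ m =>
        rw [if_neg (by simp [pvStars_succ_ne m])]
        rw [pvJoin_append (pre ++ [x]) _ (by simp) (by simp)]
        rfl
    have hset : PySem.Set.add (PySem.Set.ofList (pvP args pre.length))
          (pvNeed args (pre.length + 1))
        = PySem.Set.ofList (pvP args (pre.length + 1)) := by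
      rw [← PySem.Set.ofList_append_singleton]
      unfold pvP
      simp [List.range_succ]
    simp only [hpre, hrest, hneed, hset]
    have h' : (pre ++ [x]) ++ rest = args := by simpa using h
    have := ih (pre ++ [x]) h'
    simp only [List.length_append, List.length_cons, List.length_nil] at this ⊢
    convert this using 3

lemma pvB_eq (args : List String) :
    get_needs_alt args
      = PySem.Set.ofList ((List.range (args.length + 1)).map (pvNeed args)) := by
  simp only [get_needs_alt]
  rw [pvStars_eq args.length]
  rw [show PySem.List.pyGetD ((List.range (args.length + 1)).map pvStars)
        ((args.length : Nat) : Int) "" = pvStars args.length from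
      pvGetStars args.length args.length le_rfl]
  have hinit : PySem.Set.ofList [pvStars args.length] = PySem.Set.ofList (pvP args 0) := by
    unfold pvP pvNeed pvStars
    simp
  rw [hinit]
  have h2 := pvFold2 args args [] (by simp)
  simp only [List.length_nil, Nat.cast_zero, pvJoin_nil] at h2
  rw [h2]
  show PySem.Set.ofList (pvP args args.length) = _
  unfold pvP
  rw [List.range_succ_eq_map, List.map_cons, List.map_map]
  congr 2

-- ===== VERDICT (by name: the statement is the Claim_ definition above) =====
theorem get_needs_spec : Claim_equal_get_needs := by
  intro args _
  unfold Spec_get_needs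
  rw [pvA_eq, pvB_eq]
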